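-- pv_equiv track=rewrite | github.com/HamzaRasheed26/Simple-Document-Ranking-System | RankingSystem.py | rank_by_keyword_matching
-- ===== SOURCE A (Python) =====
-- def tokenize(text):
--     """Convert text into lowercase words, removing special characters and stop words."""
--     stop_words = {
--         "and", "the", "is", "in", "at", "of", "on", "a", "to", "it", "for",
--         "with", "as", "was", "by", "an", "be", "that", "this", "or", "are", "from", "but"
--     }
--     return [word.lower() for word in text.split() if word.isalnum() and word.lower() not in stop_words]
--
-- def rank_by_keyword_matching(documents, query):
--     """Rank documents based on keyword matching."""
--     query_tokens = tokenize(query)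
--     rankings = []
--     for doc_name, content in documents.items():
--         doc_tokens = tokenize(content)
--         matches = 0
--         for word in query_tokens:
--             for d_word in doc_tokens:
--                 if word == d_word:
--                     matches+=1
--         # matches = sum(1 for word in query_tokens if word in doc_tokens)
--         rankings.append((doc_name, matches))
--     return sorted(rankings, key=lambda x: x[1], reverse=True)
-- ===== SOURCE B (Python) =====
-- def tokenize(text):
--     """Convert text into lowercase words, removing special characters and stop words."""
--     stop_words = {
--         "and", "the", "is", "in", "at", "of", "on", "a", "to", "it", "for",
--         "with", "as", "was", "by", "an", "be", "that", "this", "or", "are", "from", "but"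
--     }
--     return [word.lower() for word in text.split() if word.isalnum() and word.lower() not in stop_words]
--
-- def rank_by_keyword_matching(documents, query):
--     """Rank documents: per matching token value, add (query multiplicity) * (doc multiplicity)."""
--     qcount = {}
--     for w in tokenize(query):
--         qcount[w] = qcount.get(w, 0) + 1
--     rankings = [(doc_name, sum(n * tokenize(content).count(w) for w, n in qcount.items()))
--                 for doc_name, content in documents.items()]
--     return sorted(rankings, key=lambda x: x[1], reverse=True)
-- ===== Notes on version B (the rewrite author's own statement) =====
-- stated objective: alternative
-- what changed: Replaces A's nested query-token x doc-token comparison loop by first aggregating the query into a multiplicity counter, then scoring each document as a sum over the DISTINCT query tokens of (query multiplicity) * (doc token count); rankings are built by a comprehension instead of append, so the per-document work iterates distinct query tokens instead of all query-doc token pairs.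
import Mathlib
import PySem

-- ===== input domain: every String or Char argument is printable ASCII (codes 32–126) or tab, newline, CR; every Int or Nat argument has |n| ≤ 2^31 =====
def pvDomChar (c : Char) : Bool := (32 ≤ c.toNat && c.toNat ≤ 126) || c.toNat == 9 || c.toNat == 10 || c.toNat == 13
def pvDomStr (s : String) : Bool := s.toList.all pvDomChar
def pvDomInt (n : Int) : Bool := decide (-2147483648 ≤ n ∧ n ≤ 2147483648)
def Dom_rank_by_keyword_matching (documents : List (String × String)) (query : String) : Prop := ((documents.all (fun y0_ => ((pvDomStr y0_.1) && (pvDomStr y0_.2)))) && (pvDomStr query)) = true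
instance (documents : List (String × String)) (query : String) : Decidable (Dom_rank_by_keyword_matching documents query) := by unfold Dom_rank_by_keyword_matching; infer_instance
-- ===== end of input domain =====

-- B aggregates the query into a multiplicity counter and scores each document as a sum over
-- the DISTINCT query tokens of (query multiplicity) * (doc token count), instead of A's nested
-- loop over all query-token × doc-token pairs; the return value is identical.

-- ===== PORT A =====
def pvStopWords : PySem.Set String :=
  PySem.Set.ofList ["and", "the", "is", "in", "at", "of", "on", "a", "to", "it", "for",
    "with", "as", "was", "by", "an", "be", "that", "this", "or", "are", "from", "but"]

def pvTokenize (text : String) : List String :=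
  ((PySem.Str.split₀ text).filter
      (fun word => PySem.Str.strIsalnum word && !(pvStopWords.contains (PySem.Str.lower word)))).map
    PySem.Str.lower

def rank_by_keyword_matching (documents : List (String × String)) (query : String) : List (String × Int) :=
  let query_tokens := pvTokenize query
  let rankings := (PySem.Dict.ofList documents).items.foldl
    (fun rankings p =>
      let doc_tokens := pvTokenize p.2
      let matched := query_tokens.foldl
        (fun matched word =>
          doc_tokens.foldl (fun matched d_word => if word == d_word then matched + 1 else matched) matched)
        (0 : Int)
      rankings ++ [(p.1, matched)])
    []
  PySem.List.sorted rankings (fun x => x.2) true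

-- ===== PORT B =====
def rank_by_keyword_matching_alt (documents : List (String × String)) (query : String) : List (String × Int) :=
  let qcount := (pvTokenize query).foldl
    (fun d w => d.insert w (d.getD w 0 + 1)) (PySem.Dict.empty : PySem.Dict String Int)
  let rankings := (PySem.Dict.ofList documents).items.map
    (fun p => (p.1, (qcount.items.map (fun q => q.2 * ((pvTokenize p.2).count q.1 : Int))).sum))
  PySem.List.sorted rankings (fun x => x.2) true

-- ===== PRECONDITION & SPEC =====
def Spec_rank_by_keyword_matching (documents : List (String × String)) (query : String) (out : List (String × Int)) : Prop := out = rank_by_keyword_matching_alt documents query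
instance (documents : List (String × String)) (query : String) (out : List (String × Int)) : Decidable (Spec_rank_by_keyword_matching documents query out) := by unfold Spec_rank_by_keyword_matching; infer_instance

-- ===== CLAIM (what is proved, stated in full; the proofs are below) =====
def Claim_equal_rank_by_keyword_matching : Prop := ∀ (documents : List (String × String)) (query : String), Dom_rank_by_keyword_matching documents query → Spec_rank_by_keyword_matching documents query (rank_by_keyword_matching documents query)

-- ===== LEMMAS AND PROOFS =====

-- a Nodup list containing x is a permutation of x :: (the list without x)
lemma pv_perm_cons_discard (s : List String) (x : String) (hn : s.Nodup) (hx : x ∈ s) :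
    s.Perm (x :: PySem.Set.discard s x) := by
  apply (List.perm_ext_iff_of_nodup hn ?_).mpr
  · intro y
    simp only [List.mem_cons, PySem.Set.mem_discard]
    constructor
    · intro hy
      by_cases h : y = x
      · exact Or.inl h
      · exact Or.inr ⟨hy, h⟩
    · rintro (rfl | ⟨hy, _⟩) <;> [exact hx; exact hy]
  · exact List.Nodup.cons (by simp [PySem.Set.mem_discard]) (PySem.Set.nodup_discard _ x hn)

-- summing f over a list = summing (multiplicity * f) over the distinct elements
lemma pv_sum_over_distinct (qt : List String) (f : String → Int) :
    (qt.map f).sum = ((PySem.Set.ofList qt).map (fun k => (qt.count k : Int) * f k)).sum := by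
  induction qt with
  | nil => simp [PySem.Set.ofList]
  | cons x xs ih =>
    rw [PySem.Set.ofList_cons]
    simp only [List.map_cons, List.sum_cons, ih]
    have hmap : (PySem.Set.discard (PySem.Set.ofList xs) x).map
        (fun k => (((x :: xs).count k : Nat) : Int) * f k)
        = (PySem.Set.discard (PySem.Set.ofList xs) x).map (fun k => ((xs.count k : Nat) : Int) * f k) := by
      apply List.map_congr_left
      intro k hk
      have hne : k ≠ x := ((PySem.Set.mem_discard _ _ _).mp hk).2
      simp [Ne.symm hne]
    rw [hmap]
    by_cases hx : x ∈ xs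
    · have hperm := pv_perm_cons_discard (PySem.Set.ofList xs) x (PySem.Set.nodup_ofList xs)
        ((PySem.Set.mem_ofList _ _).mpr hx)
      rw [(hperm.map (fun k => ((xs.count k : Nat) : Int) * f k)).sum_eq]
      simp only [List.map_cons, List.sum_cons, List.count_cons_self]
      push_cast
      ring
    · have hd : PySem.Set.discard (PySem.Set.ofList xs) x = PySem.Set.ofList xs := by
        unfold PySem.Set.discard
        apply List.filter_eq_self.mpr
        intro y hy
        have : y ≠ x := fun h => hx (h ▸ (PySem.Set.mem_ofList _ _).mp hy)
        simpa using this
      rw [hd]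
      have hc : xs.count x = 0 := List.count_eq_zero.mpr hx
      simp [List.count_cons_self, hc]

-- A's nested loop starting from m adds the total number of matching pairs
lemma pv_nested_foldl (qt dt : List String) (m : Int) :
    qt.foldl
      (fun matched word =>
        dt.foldl (fun matched d_word => if word == d_word then matched + 1 else matched) matched)
      m = m + (qt.map (fun w => (dt.count w : Int))).sum := by
  induction qt generalizing m with
  | nil => simp
  | cons w qt ih =>
    rw [List.foldl_cons]
    have h1 : dt.foldl (fun matched d_word => if w == d_word then matched + 1 else matched) m
        = m + (dt.countP (fun d_word => w == d_word) : Int) := PySem.List.foldl_if_add_one _ _ _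
    have hcount : dt.countP (fun d_word => w == d_word) = dt.count w := by
      simp [List.count, BEq.comm]
    rw [h1, ih, hcount]
    simp only [List.map_cons, List.sum_cons]
    ring

-- B's per-document score = A's per-document score
lemma pv_matches_eq (qt dt : List String) :
    qt.foldl
      (fun matched word =>
        dt.foldl (fun matched d_word => if word == d_word then matched + 1 else matched) matched)
      (0 : Int)
    = (((qt.foldl (fun d w => d.insert w (d.getD w 0 + 1))
          (PySem.Dict.empty : PySem.Dict String Int)).items).map
        (fun q => q.2 * (dt.count q.1 : Int))).sum := by
  rw [pv_nested_foldl, PySem.Dict.foldl_insert_getD_add_one_eq_counter, PySem.Dict.items_counter,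
    List.map_map]
  rw [pv_sum_over_distinct qt (fun w => (dt.count w : Int))]
  simp only [Function.comp_def, zero_add]

-- ===== VERDICT (by name: the statement is the Claim_ definition above) =====
theorem rank_by_keyword_matching_spec : Claim_equal_rank_by_keyword_matching := by
  intro documents query _
  unfold Spec_rank_by_keyword_matching rank_by_keyword_matching rank_by_keyword_matching_alt
  dsimp only
  rw [PySem.List.foldl_append_singleton_eq_map]
  simp only [pv_matches_eq, List.nil_append]
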